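-- pv_equiv track=rewrite | github.com/alexmao1024/xiaoyangweb | app.py | extract_document_structure
-- ===== SOURCE A (Python) =====
-- def extract_document_structure(lines):
--     """提取文档结构"""
--     structure = []
--     current_section = ""
--     content_buffer = []
--
--     for line in lines:
--         line = line.strip()
--         if not line:
--             continue
--
--         # 检测标题
--         if line.startswith('**') and line.endswith('**'):
--             # 保存上一节的内容
--             if current_section and content_buffer:
--                 structure.append({
--                     '章节': current_section,
--                     '内容': '\n'.join(content_buffer)
--                 })
--
--             # 开始新的章节
--             current_section = line.strip('*').strip()
--             content_buffer = []
--         elif line.startswith('#'):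
--             # Markdown标题
--             if current_section and content_buffer:
--                 structure.append({
--                     '章节': current_section,
--                     '内容': '\n'.join(content_buffer)
--                 })
--
--             current_section = line.lstrip('#').strip()
--             content_buffer = []
--         else:
--             # 普通内容
--             if line and not line.startswith('|'):  # 排除表格行
--                 content_buffer.append(line)
--
--     # 保存最后一节
--     if current_section and content_buffer:
--         structure.append({
--             '章节': current_section,
--             '内容': '\n'.join(content_buffer)
--         })
--
--     return structure
-- ===== SOURCE B (Python) =====
-- def extract_document_structure(lines):
--     """提取文档结构: split the cleaned lines into header-delimited segments, render each."""
--     clean = [l for l in (raw.strip() for raw in lines) if l]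
--
--     def is_header(l):
--         return (l.startswith('**') and l.endswith('**')) or l.startswith('#')
--
--     def title_of(l):
--         if l.startswith('**') and l.endswith('**'):
--             return l.strip('*').strip()
--         return l.lstrip('#').strip()
--
--     def span_until_header(ls):
--         for i, l in enumerate(ls):
--             if is_header(l):
--                 return ls[:i], ls[i:]
--         return ls, []
--
--     out = []
--     _, rest = span_until_header(clean)      # content before the first header is dropped
--     while rest:
--         raw_body, rest2 = span_until_header(rest[1:])
--         title = title_of(rest[0])
--         body = [l for l in raw_body if not l.startswith('|')]
--         if title and body:
--             out.append({'章节': title, '内容': '\n'.join(body)})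
--         rest = rest2
--     return out
-- ===== Notes on version B (the rewrite author's own statement) =====
-- stated objective: alternative
-- what changed: Replaces A's single-pass accumulate-and-flush state machine (mutable current_section/content_buffer flushed at each header and at the end) with a segmentation approach: clean the lines once, split them into header-delimited segments with a span helper, and render each segment independently.
import Mathlib
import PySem

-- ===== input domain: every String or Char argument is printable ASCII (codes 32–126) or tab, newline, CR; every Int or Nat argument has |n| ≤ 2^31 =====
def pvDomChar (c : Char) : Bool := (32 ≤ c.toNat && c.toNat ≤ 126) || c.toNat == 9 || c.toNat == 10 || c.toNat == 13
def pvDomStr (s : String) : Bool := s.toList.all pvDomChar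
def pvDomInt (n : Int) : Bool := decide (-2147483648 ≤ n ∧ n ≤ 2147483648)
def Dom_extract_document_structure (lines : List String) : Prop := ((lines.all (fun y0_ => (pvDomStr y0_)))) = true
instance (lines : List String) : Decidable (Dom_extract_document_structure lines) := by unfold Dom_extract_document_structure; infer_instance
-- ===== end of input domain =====

-- B replaces A's accumulate-and-flush state machine by a segmentation approach
-- (clean once, split at headers with a span helper, render each segment); same cost.


-- the dict literal {'章节': t, '内容': c} as an association list (shared by both ports)
def pvMkEntry (t c : String) : List (String × String) := [("章节", t), ("内容", c)]

-- line.lstrip('#') ported by hand: drop leading '#' characters (exact: single ASCII strip char)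
def pvLstripHash (s : String) : String := String.ofList (s.toList.dropWhile (· == '#'))

-- ===== PORT A =====
-- A's loop body on the already-stripped line; state = (structure, current_section, content_buffer)
def pvStepC (st : List (List (String × String)) × String × List String) (line : String) :
    List (List (String × String)) × String × List String :=
  if line == "" then st
  else if PySem.Str.startswith line "**" && PySem.Str.endswith line "**" then
    ((if st.2.1 ≠ "" ∧ st.2.2 ≠ [] then
        st.1 ++ [pvMkEntry st.2.1 (PySem.Str.join "\n" st.2.2)] else st.1),
      PySem.Str.strip (PySem.Str.stripChars line "*"), [])
  else if PySem.Str.startswith line "#" then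
    ((if st.2.1 ≠ "" ∧ st.2.2 ≠ [] then
        st.1 ++ [pvMkEntry st.2.1 (PySem.Str.join "\n" st.2.2)] else st.1),
      PySem.Str.strip (pvLstripHash line), [])
  else if !(line == "") && !(PySem.Str.startswith line "|") then
    (st.1, st.2.1, st.2.2 ++ [line])
  else st

-- line = raw.strip() at the top of A's loop body
def pvStepA (st : List (List (String × String)) × String × List String) (raw : String) :
    List (List (String × String)) × String × List String :=
  pvStepC st (PySem.Str.strip raw)

def extract_document_structure (lines : List String) : List (List (String × String)) :=
  let st := lines.foldl pvStepA ([], "", [])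
  st.1 ++ (if st.2.1 ≠ "" ∧ st.2.2 ≠ [] then
    [pvMkEntry st.2.1 (PySem.Str.join "\n" st.2.2)] else [])

-- ===== PORT B =====
def pvIsHeader (l : String) : Bool :=
  (PySem.Str.startswith l "**" && PySem.Str.endswith l "**") || PySem.Str.startswith l "#"

def pvTitleOf (l : String) : String :=
  if PySem.Str.startswith l "**" && PySem.Str.endswith l "**" then
    PySem.Str.strip (PySem.Str.stripChars l "*")
  else PySem.Str.strip (pvLstripHash l)

-- span_until_header: (ls[:i], ls[i:]) at the first header index i (or (ls, []))
def pvSpan (ls : List String) : List String × List String :=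
  match ls with
  | [] => ([], [])
  | l :: t =>
    if pvIsHeader l then ([], l :: t)
    else
      let p := pvSpan t
      (l :: p.1, p.2)

theorem pvSpan_snd_length (ls : List String) : (pvSpan ls).2.length ≤ ls.length := by
  induction ls with
  | nil => simp [pvSpan]
  | cons l t ih =>
    simp only [pvSpan]
    split
    · simp
    · exact Nat.le_succ_of_le ih

-- the 'while rest:' loop of B
def pvParseLoop (rest : List String) : List (List (String × String)) :=
  match rest with
  | [] => []
  | h :: t =>
    let p := pvSpan t
    let title := pvTitleOf h
    let body := p.1.filter (fun l => !(PySem.Str.startswith l "|"))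
    (if title ≠ "" ∧ body ≠ [] then [pvMkEntry title (PySem.Str.join "\n" body)] else [])
      ++ pvParseLoop p.2
termination_by rest.length
decreasing_by exact Nat.lt_succ_of_le (pvSpan_snd_length t)

def extract_document_structure_alt (lines : List String) : List (List (String × String)) :=
  let clean := (lines.map PySem.Str.strip).filter (fun l => !(l == ""))
  pvParseLoop (pvSpan clean).2

-- ===== PRECONDITION & SPEC =====
def Spec_extract_document_structure (lines : List String) (out : List (List (String × String))) : Prop := out = extract_document_structure_alt lines
instance (lines : List String) (out : List (List (String × String))) : Decidable (Spec_extract_document_structure lines out) := by unfold Spec_extract_document_structure; infer_instance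

-- ===== CLAIM (what is proved, stated in full; the proofs are below) =====
def Claim_equal_extract_document_structure : Prop := ∀ (lines : List String), Dom_extract_document_structure lines → Spec_extract_document_structure lines (extract_document_structure lines)

-- ===== LEMMAS AND PROOFS =====

def pvFlush (cur : String) (buf : List String) : List (List (String × String)) :=
  if cur ≠ "" ∧ buf ≠ [] then [pvMkEntry cur (PySem.Str.join "\n" buf)] else []

-- A's run on the cleaned lines, as a section-building recursion
def pvF (cur : String) (buf : List String) : List String → List (List (String × String))
  | [] => pvFlush cur buf
  | l :: cs =>
    if pvIsHeader l then pvFlush cur buf ++ pvF (pvTitleOf l) [] cs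
    else if PySem.Str.startswith l "|" then pvF cur buf cs
    else pvF cur (buf ++ [l]) cs

-- step 1: the fold over raw lines equals the fold over the cleaned lines
theorem pvFold_clean (lines : List String) (st : List (List (String × String)) × String × List String) :
    lines.foldl pvStepA st =
      ((lines.map PySem.Str.strip).filter (fun l => !(l == ""))).foldl pvStepC st := by
  induction lines generalizing st with
  | nil => rfl
  | cons raw rest ih =>
    by_cases h : PySem.Str.strip raw = ""
    · simp [pvStepA, pvStepC, h, ih]
    · simp [pvStepA, h, ih, pvStepC]

-- step 2: each pvStepC branch on a nonempty line, matched against pvF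
theorem pvStepC_header (st : List (List (String × String)) × String × List String)
    (l : String) (h0 : ¬ l = "") (h : pvIsHeader l = true) :
    pvStepC st l = (st.1 ++ pvFlush st.2.1 st.2.2, pvTitleOf l, []) := by
  rcases st with ⟨acc, cur, buf⟩
  simp only [pvIsHeader] at h
  simp at h
  simp only [pvStepC]
  split_ifs with c1 c2 c3 c4 <;> simp_all [pvTitleOf, pvFlush]

theorem pvStepC_bar (st : List (List (String × String)) × String × List String)
    (l : String) (h0 : ¬ l = "") (h : pvIsHeader l = false)
    (hb : PySem.Chars.startswith l.toList ['|'] = true) :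
    pvStepC st l = st := by
  simp only [pvIsHeader] at h
  simp at h
  simp only [pvStepC]
  split_ifs with c1 c2 c3 c4 <;> simp_all

theorem pvStepC_content (st : List (List (String × String)) × String × List String)
    (l : String) (h0 : ¬ l = "") (h : pvIsHeader l = false)
    (hb : PySem.Chars.startswith l.toList ['|'] = false) :
    pvStepC st l = (st.1, st.2.1, st.2.2 ++ [l]) := by
  simp only [pvIsHeader] at h
  simp at h
  simp only [pvStepC]
  split_ifs with c1 c2 c3 c4 <;> simp_all

-- step 3: the cleaned fold computes pvF
theorem pvFoldC_eq_pvF (cs : List String) (hne : ∀ l ∈ cs, l ≠ "")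
    (acc : List (List (String × String))) (cur : String) (buf : List String) :
    (cs.foldl pvStepC (acc, cur, buf)).1 ++
        pvFlush (cs.foldl pvStepC (acc, cur, buf)).2.1 (cs.foldl pvStepC (acc, cur, buf)).2.2 =
      acc ++ pvF cur buf cs := by
  induction cs generalizing acc cur buf with
  | nil => simp [pvF]
  | cons l cs ih =>
    have h0 : ¬ l = "" := hne l (by simp)
    have hne' : ∀ x ∈ cs, x ≠ "" := fun x hx => hne x (by simp [hx])
    by_cases hh : pvIsHeader l = true
    · rw [List.foldl_cons, pvStepC_header (acc, cur, buf) l h0 hh, ih hne' _ _ _]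
      simp [pvF, hh]
    · have hh' : pvIsHeader l = false := by simpa using hh
      by_cases hb : PySem.Chars.startswith l.toList ['|'] = true
      · rw [List.foldl_cons, pvStepC_bar (acc, cur, buf) l h0 hh' hb, ih hne' _ _ _]
        simp [pvF, hh', hb]
      · have hb' : PySem.Chars.startswith l.toList ['|'] = false := by simpa using hb
        rw [List.foldl_cons, pvStepC_content (acc, cur, buf) l h0 hh' hb', ih hne' _ _ _]
        simp [pvF, hh', hb']

-- step 4: pvF with a pending section equals span-then-render
theorem pvF_eq_span (cs : List String) (t : String) (buf : List String) :
    pvF t buf cs =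
      pvFlush t (buf ++ (pvSpan cs).1.filter (fun l => !(PySem.Str.startswith l "|")))
        ++ pvParseLoop (pvSpan cs).2 := by
  induction cs generalizing t buf with
  | nil => simp [pvF, pvSpan, pvParseLoop]
  | cons l cs ih =>
    by_cases hh : pvIsHeader l = true
    · simp only [pvF, pvSpan, hh, if_pos, List.filter_nil, List.append_nil]
      rw [ih]
      conv_rhs => rw [pvParseLoop]
      simp [pvFlush]
    · have hh' : pvIsHeader l = false := by simpa using hh
      by_cases hb : PySem.Chars.startswith l.toList ['|'] = true
      · simpa [pvF, pvSpan, hh', hb] using ih t buf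
      · have hb' : PySem.Chars.startswith l.toList ['|'] = false := by simpa using hb
        simpa [pvF, pvSpan, hh', hb'] using ih t (buf ++ [l])

-- step 5: before the first header, the buffer is irrelevant (empty title never flushes)
theorem pvF_empty (cs : List String) (buf : List String) :
    pvF "" buf cs = pvParseLoop (pvSpan cs).2 := by
  induction cs generalizing buf with
  | nil => simp [pvF, pvSpan, pvParseLoop, pvFlush]
  | cons l cs ih =>
    by_cases hh : pvIsHeader l = true
    · simp only [pvF, pvSpan, hh, ite_true]
      rw [pvF_eq_span]
      conv_rhs => rw [pvParseLoop]
      simp [pvFlush]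
    · have hh' : pvIsHeader l = false := by simpa using hh
      by_cases hb : PySem.Chars.startswith l.toList ['|'] = true
      · simpa [pvF, pvSpan, hh', hb] using ih buf
      · have hb' : PySem.Chars.startswith l.toList ['|'] = false := by simpa using hb
        simpa [pvF, pvSpan, hh', hb'] using ih (buf ++ [l])

-- ===== VERDICT (by name: the statement is the Claim_ definition above) =====
theorem extract_document_structure_spec : Claim_equal_extract_document_structure := by
  intro lines _
  show extract_document_structure lines = extract_document_structure_alt lines
  unfold extract_document_structure extract_document_structure_alt
  rw [pvFold_clean]
  have hne : ∀ l ∈ (lines.map PySem.Str.strip).filter (fun l => !(l == "")), l ≠ "" := by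
    intro l hl
    have := List.of_mem_filter hl
    simpa using this
  have h := pvFoldC_eq_pvF ((lines.map PySem.Str.strip).filter (fun l => !(l == ""))) hne [] "" []
  simp only [List.nil_append] at h
  rw [show ∀ (st : List (List (String × String)) × String × List String),
      (st.1 ++ if st.2.1 ≠ "" ∧ st.2.2 ≠ [] then
        [pvMkEntry st.2.1 (PySem.Str.join "\n" st.2.2)] else []) = st.1 ++ pvFlush st.2.1 st.2.2
      from fun st => rfl]
  rw [h, pvF_empty]
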